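-- pv_equiv track=rewrite | github.com/bsmith175/poker-vision | probability.py | flush
-- ===== SOURCE A (Python) =====
-- def flush(cards):
--     suits = {}
--     count = 1
--     for i in cards:
--         if i[1] in suits.keys():
--             suits[i[1]] += 1
--         else:
--             suits[i[1]] = 1
--     for j in suits.values():
--         if j > count:
--             count = j
--     if count > 5:
--         count = 5
--     return count
-- ===== SOURCE B (Python) =====
-- def flush(cards):
--     best = max((sum(1 for d in cards if d[1] == c[1]) for c in cards), default=1)
--     return min(best, 5)
-- ===== Notes on version B (the rewrite author's own statement) =====
-- stated objective: simpler
-- what changed: Replaced the dict-of-suit-counts aggregation plus a separate max-over-values loop with a single expression: for each card count the cards sharing its suit (a nested scan), take the max with default 1, and cap at 5.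
import Mathlib
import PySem

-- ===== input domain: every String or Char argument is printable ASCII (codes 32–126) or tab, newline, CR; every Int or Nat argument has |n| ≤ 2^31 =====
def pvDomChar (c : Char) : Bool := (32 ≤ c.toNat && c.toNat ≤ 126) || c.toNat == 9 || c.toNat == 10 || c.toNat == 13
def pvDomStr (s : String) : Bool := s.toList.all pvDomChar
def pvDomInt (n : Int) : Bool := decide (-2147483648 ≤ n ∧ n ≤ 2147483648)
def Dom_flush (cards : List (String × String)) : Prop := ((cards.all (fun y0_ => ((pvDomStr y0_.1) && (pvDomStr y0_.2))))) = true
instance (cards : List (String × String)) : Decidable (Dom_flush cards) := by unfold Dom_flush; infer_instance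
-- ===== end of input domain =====

-- B replaces A's dict-of-suit-counts plus max-over-values loops by a single max (with default 1,
-- capped at 5) over a per-card nested count of same-suit cards: shorter, no dict, at the cost of O(n^2).

-- ===== PORT A =====
def flush (cards : List (String × String)) : Int :=
  let suits := cards.foldl
    (fun d i => if d.contains i.2 then d.insert i.2 (d.getD i.2 0 + 1) else d.insert i.2 1)
    PySem.Dict.empty
  let count := suits.values.foldl (fun c j => if j > c then j else c) 1
  if count > 5 then 5 else count

-- ===== PORT B =====
def flush_alt (cards : List (String × String)) : Int :=
  let best := PySem.List.maxD
    (cards.map (fun c => ((cards.countP (fun d => d.2 == c.2) : Nat) : Int)))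
    (fun x => x) 1
  min best 5

-- ===== PRECONDITION & SPEC =====
def Spec_flush (cards : List (String × String)) (out : Int) : Prop := out = flush_alt cards
instance (cards : List (String × String)) (out : Int) : Decidable (Spec_flush cards out) := by unfold Spec_flush; infer_instance

-- ===== CLAIM (what is proved, stated in full; the proofs are below) =====
def Claim_equal_flush : Prop := ∀ (cards : List (String × String)), Dom_flush cards → Spec_flush cards (flush cards)

-- ===== LEMMAS AND PROOFS =====

-- a dict lookup of an absent key yields the default
lemma getD_of_not_contains {κ ν : Type} [BEq κ] [LawfulBEq κ] (d : PySem.Dict κ ν) (k : κ) (v : ν)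
    (h : d.contains k = false) : d.getD k v = v := by
  simp [PySem.Dict.getD, PySem.Dict.get?, PySem.Dict.contains] at *
  rw [List.find?_eq_none.2]
  · rfl
  · intro p hp; simpa using h p.1 p.2 hp

-- A's suit-counting loop builds exactly the counter of the suit list
lemma suits_eq_counter (cards : List (String × String)) :
    cards.foldl
      (fun d i => if d.contains i.2 then d.insert i.2 (d.getD i.2 0 + 1) else d.insert i.2 1)
      PySem.Dict.empty
    = PySem.Dict.counter (cards.map (·.2)) := by
  rw [← PySem.Dict.foldl_insert_getD_add_one_eq_counter, List.foldl_map]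
  congr 1
  funext d i
  by_cases h : d.contains i.2
  · simp [h]
  · rw [getD_of_not_contains d i.2 0 (by simpa using h)]
    simp [h]

-- running max of two Int lists with the same members, from the same seed, agree
lemma foldl_max_eq_of_mem_iff (xs ys : List Int) (a : Int)
    (h : ∀ x, x ∈ xs ↔ x ∈ ys) : xs.foldl max a = ys.foldl max a := by
  apply le_antisymm
  · rcases PySem.List.foldl_max_mem xs a with h1 | h1
    · rw [h1]; exact (PySem.List.le_foldl_max ys a).1
    · exact (PySem.List.le_foldl_max ys a).2 _ ((h _).1 h1)
  · rcases PySem.List.foldl_max_mem ys a with h1 | h1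
    · rw [h1]; exact (PySem.List.le_foldl_max xs a).1
    · exact (PySem.List.le_foldl_max xs a).2 _ ((h _).2 h1)

-- B's per-card same-suit count is the count of the card's suit in the suit list
lemma countP_eq_count (cards : List (String × String)) (c : String × String) :
    ((cards.countP (fun d => d.2 == c.2) : Nat) : Int)
      = (((cards.map (·.2)).count c.2 : Nat) : Int) := by
  rw [List.count_eq_countP, List.countP_map]
  rfl

theorem flush_spec : Claim_equal_flush := by
  intro cards _
  unfold Spec_flush flush flush_alt
  simp only []
  rw [suits_eq_counter]
  set ms := cards.map (·.2) with hms
  set g : String → Int := fun k => ((ms.count k : Nat) : Int) with hg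
  -- A's values list and B's per-card list
  have hvals : (PySem.Dict.counter ms).values = (PySem.Set.ofList ms).map g := by
    show ((PySem.Dict.counter ms).items).map (·.2) = _
    rw [PySem.Dict.items_counter, List.map_map]
    rfl
  have hB : cards.map (fun c => ((cards.countP (fun d => d.2 == c.2) : Nat) : Int))
      = ms.map g := by
    rw [hms, List.map_map]
    exact List.map_congr_left (fun c _ => countP_eq_count cards c)
  -- A's inner loop is a running max
  have hstep : (fun (c j : Int) => if j > c then j else c) = max := by
    funext c j; split <;> omega
  rw [hvals, hstep]
  -- both are foldl max 1 over lists with the same members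
  have hmem : ∀ x, x ∈ (PySem.Set.ofList ms).map g ↔ x ∈ ms.map g := by
    intro x
    simp only [List.mem_map]
    constructor
    · rintro ⟨k, hk, rfl⟩; exact ⟨k, (PySem.Set.mem_ofList ms k).1 hk, rfl⟩
    · rintro ⟨k, hk, rfl⟩; exact ⟨k, (PySem.Set.mem_ofList ms k).2 hk, rfl⟩
  have hfold : ((PySem.Set.ofList ms).map g).foldl max 1 = (ms.map g).foldl max 1 :=
    foldl_max_eq_of_mem_iff _ _ 1 hmem
  rw [hfold, hB]
  -- B's maxD with default 1 equals the same running max, since every count is ≥ 1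
  have hmaxD : PySem.List.maxD (ms.map g) (fun x => x) 1 = (ms.map g).foldl max 1 := by
    cases hcase : ms with
    | nil => simp [PySem.List.maxD, PySem.List.max?]
    | cons m t =>
      have h1 : (1 : Int) ≤ g m := by
        have : 0 < (m :: t).count m := List.count_pos_iff.2 (by simp)
        simp only [hg, hcase]
        exact_mod_cast this
      simp only [List.map_cons, PySem.List.maxD, PySem.List.max?_id_cons, Option.getD_some,
        List.foldl_cons]
      rw [max_eq_right h1]
  rw [hmaxD]
  -- the 5-cap: A's if vs B's min
  rcases le_or_gt ((ms.map g).foldl max 1) 5 with h | h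
  · rw [if_neg (by omega), min_eq_left h]
  · rw [if_pos h, min_eq_right (by omega)]
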